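-- pv_equiv track=rewrite | github.com/GIDR-AI/docs | scripts/categorize_testcases.py | categorize_testcase
-- ===== SOURCE A (Python) =====
-- def categorize_testcase(tc):
--     """Categorize a test case based on its name, objective, and content"""
--     key = tc.get("key", "")
--     name = (tc.get("name") or "").lower()
--     objective = (tc.get("objective") or "").lower()
--     text = f"{name} {objective}".lower()
--
--     categories = []
--
--     # Authentication & Onboarding
--     if any(word in text for word in ["sign in", "signin", "login", "log in", "sign-in"]):
--         if "invalid" in text or "error" in text:
--             categories.append(("authentication", "signing-in", "error-cases"))
--         else:
--             categories.append(("authentication", "signing-in"))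
--     elif any(word in text for word in ["sign up", "signup", "register", "registration", "sign-up"]):
--         if "invalid" in text or "error" in text:
--             categories.append(("authentication", "signing-up", "error-cases"))
--         else:
--             categories.append(("authentication", "signing-up"))
--     elif "landing page" in text or "landing" in text:
--         categories.append(("authentication", "landing-page"))
--     elif "forgot password" in text or "reset password" in text or "change password" in text:
--         categories.append(("authentication", "signing-in", "password-management"))
--
--     # Organizations and Teams
--     elif any(word in text for word in ["create team", "create a team", "team creation"]):
--         categories.append(("organizations", "create-team"))
--     elif "member profile" in text or "profile" in text:
--         categories.append(("organizations", "member-profile"))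
--     elif "organization settings" in text or "org settings" in text:
--         categories.append(("organizations", "organization-settings"))
--     elif "invite member" in text or "invite" in text:
--         categories.append(("organizations", "invite-members"))
--
--     # GIDRs (top level)
--     elif "analytics" in text:
--         categories.append(("gidrs", "analytics"))
--     elif "mcp server" in text or "mcp" in text:
--         categories.append(("gidrs", "mcp-server"))
--     elif "language selection" in text or "language" in text:
--         categories.append(("gidrs", "language-selection"))
--     elif "create gidr" in text and "team" in text:
--         categories.append(("gidrs", "create-gidr"))
--
--     # GIDR Info
--     elif "gidr info" in text or "info popup" in text:
--         categories.append(("gidr", "info", "gidr-info"))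
--
--     # Prompts
--     elif "prompt" in text:
--         categories.append(("gidr", "prompts"))
--
--     # Ingestion Settings
--     elif "data source" in text or "data sources" in text:
--         categories.append(("gidr", "ingestion-settings", "data-sources"))
--     elif "file" in text and ("upload" in text or "ingest" in text):
--         categories.append(("gidr", "ingestion-settings", "data-sources", "files"))
--     elif "url" in text and ("add" in text or "ingest" in text):
--         categories.append(("gidr", "ingestion-settings", "data-sources", "urls"))
--     elif "connector" in text:
--         categories.append(("gidr", "ingestion-settings", "data-sources", "connectors"))
--     elif "database" in text:
--         categories.append(("gidr", "ingestion-settings", "data-sources", "database"))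
--     elif "tag" in text:
--         categories.append(("gidr", "ingestion-settings", "tags"))
--
--     # Design
--     elif "gidget" in text or "gidgets library" in text:
--         categories.append(("gidr", "design", "gidgets-library"))
--     elif "studio" in text:
--         categories.append(("gidr", "design", "studio"))
--
--     # Workflows
--     elif "workflow" in text or "work flow" in text:
--         categories.append(("gidr", "workflows"))
--     elif "node" in text and ("workflow" in text or "flow" in text):
--         categories.append(("gidr", "workflows", "nodes"))
--
--     # Default fallback
--     if not categories:
--         categories.append(("uncategorized",))
--
--     return categories[0] if categories else ("uncategorized",)
-- ===== SOURCE B (Python) =====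
-- # B: single left-to-right sweep of the text collecting every occurring keyword
-- # into a set, then classification by set algebra over that feature set.
--
-- KEYWORDS = [
--     "sign in", "signin", "login", "log in", "sign-in",
--     "invalid", "error",
--     "sign up", "signup", "register", "registration", "sign-up",
--     "landing page", "landing",
--     "forgot password", "reset password", "change password",
--     "create team", "create a team", "team creation",
--     "member profile", "profile",
--     "organization settings", "org settings",
--     "invite member", "invite",
--     "analytics",
--     "mcp server", "mcp",
--     "language selection", "language",
--     "create gidr", "team",
--     "gidr info", "info popup",
--     "prompt",
--     "data source", "data sources",
--     "file", "upload", "ingest",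
--     "url", "add",
--     "connector", "database", "tag",
--     "gidget", "gidgets library",
--     "studio",
--     "workflow", "work flow",
--     "node", "flow",
-- ]
--
--
-- def _found_keywords(text):
--     """One sweep over the text: at each position, record every keyword starting there."""
--     found = set()
--     for i in range(len(text) + 1):
--         for kw in KEYWORDS:
--             if text[i:i + len(kw)] == kw:
--                 found.add(kw)
--     return found
--
--
-- def categorize_testcase(tc):
--     """Categorize a test case based on its name, objective, and content"""
--     name = (tc.get("name") or "").lower()
--     objective = (tc.get("objective") or "").lower()
--     text = f"{name} {objective}".lower()
--     found = _found_keywords(text)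
--     err = bool(found & {"invalid", "error"})
--     if found & {"sign in", "signin", "login", "log in", "sign-in"}:
--         return ("authentication", "signing-in", "error-cases") if err else ("authentication", "signing-in")
--     if found & {"sign up", "signup", "register", "registration", "sign-up"}:
--         return ("authentication", "signing-up", "error-cases") if err else ("authentication", "signing-up")
--     if found & {"landing page", "landing"}:
--         return ("authentication", "landing-page")
--     if found & {"forgot password", "reset password", "change password"}:
--         return ("authentication", "signing-in", "password-management")
--     if found & {"create team", "create a team", "team creation"}:
--         return ("organizations", "create-team")
--     if found & {"member profile", "profile"}:
--         return ("organizations", "member-profile")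
--     if found & {"organization settings", "org settings"}:
--         return ("organizations", "organization-settings")
--     if found & {"invite member", "invite"}:
--         return ("organizations", "invite-members")
--     if "analytics" in found:
--         return ("gidrs", "analytics")
--     if found & {"mcp server", "mcp"}:
--         return ("gidrs", "mcp-server")
--     if found & {"language selection", "language"}:
--         return ("gidrs", "language-selection")
--     if {"create gidr", "team"} <= found:
--         return ("gidrs", "create-gidr")
--     if found & {"gidr info", "info popup"}:
--         return ("gidr", "info", "gidr-info")
--     if "prompt" in found:
--         return ("gidr", "prompts")
--     if found & {"data source", "data sources"}:
--         return ("gidr", "ingestion-settings", "data-sources")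
--     if "file" in found and found & {"upload", "ingest"}:
--         return ("gidr", "ingestion-settings", "data-sources", "files")
--     if "url" in found and found & {"add", "ingest"}:
--         return ("gidr", "ingestion-settings", "data-sources", "urls")
--     if "connector" in found:
--         return ("gidr", "ingestion-settings", "data-sources", "connectors")
--     if "database" in found:
--         return ("gidr", "ingestion-settings", "data-sources", "database")
--     if "tag" in found:
--         return ("gidr", "ingestion-settings", "tags")
--     if found & {"gidget", "gidgets library"}:
--         return ("gidr", "design", "gidgets-library")
--     if "studio" in found:
--         return ("gidr", "design", "studio")
--     if found & {"workflow", "work flow"}: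
--         return ("gidr", "workflows")
--     if "node" in found and found & {"workflow", "flow"}:
--         return ("gidr", "workflows", "nodes")
--     return ("uncategorized",)
-- ===== Notes on version B (the rewrite author's own statement) =====
-- stated objective: alternative
-- what changed: Instead of testing substrings branch by branch, B makes a single sweep over the text collecting the set of all occurring keywords, then classifies by set algebra (intersection/subset tests) over that feature set.
import Mathlib
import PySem

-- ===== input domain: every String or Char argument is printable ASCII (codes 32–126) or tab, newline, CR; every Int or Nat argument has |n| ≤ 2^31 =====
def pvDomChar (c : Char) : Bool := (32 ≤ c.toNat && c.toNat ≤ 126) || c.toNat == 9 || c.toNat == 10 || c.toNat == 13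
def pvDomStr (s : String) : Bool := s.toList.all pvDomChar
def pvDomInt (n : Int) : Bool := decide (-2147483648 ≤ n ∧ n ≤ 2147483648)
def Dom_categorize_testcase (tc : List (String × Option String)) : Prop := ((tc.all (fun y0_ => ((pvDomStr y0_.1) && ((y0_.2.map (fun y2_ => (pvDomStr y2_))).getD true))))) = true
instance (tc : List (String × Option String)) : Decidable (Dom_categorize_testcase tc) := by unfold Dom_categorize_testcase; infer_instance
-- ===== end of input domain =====

-- B replaces A's branch-by-branch substring testing with one sweep over the text that
-- collects the set of all occurring keywords, then classifies by set algebra on that set.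

-- ===== PORT A =====
-- literal port of A's if/elif chain ('key' is extracted by A but never used, so it is dropped)
def categorize_testcase (tc : List (String × Option String)) : List String :=
  let d := PySem.Dict.mk tc
  let name := PySem.Str.lower (((d.get? "name").getD none).getD "")
  let objective := PySem.Str.lower (((d.get? "objective").getD none).getD "")
  let text := PySem.Str.lower (PySem.Str.join "" [name, " ", objective])
  let categories : List (List String) :=
    if ["sign in", "signin", "login", "log in", "sign-in"].any (fun w => PySem.Str.isIn w text) then
      if PySem.Str.isIn "invalid" text || PySem.Str.isIn "error" text then
        [["authentication", "signing-in", "error-cases"]]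
      else
        [["authentication", "signing-in"]]
    else if ["sign up", "signup", "register", "registration", "sign-up"].any (fun w => PySem.Str.isIn w text) then
      if PySem.Str.isIn "invalid" text || PySem.Str.isIn "error" text then
        [["authentication", "signing-up", "error-cases"]]
      else
        [["authentication", "signing-up"]]
    else if PySem.Str.isIn "landing page" text || PySem.Str.isIn "landing" text then
      [["authentication", "landing-page"]]
    else if PySem.Str.isIn "forgot password" text || (PySem.Str.isIn "reset password" text || PySem.Str.isIn "change password" text) then
      [["authentication", "signing-in", "password-management"]]
    else if ["create team", "create a team", "team creation"].any (fun w => PySem.Str.isIn w text) then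
      [["organizations", "create-team"]]
    else if PySem.Str.isIn "member profile" text || PySem.Str.isIn "profile" text then
      [["organizations", "member-profile"]]
    else if PySem.Str.isIn "organization settings" text || PySem.Str.isIn "org settings" text then
      [["organizations", "organization-settings"]]
    else if PySem.Str.isIn "invite member" text || PySem.Str.isIn "invite" text then
      [["organizations", "invite-members"]]
    else if PySem.Str.isIn "analytics" text then
      [["gidrs", "analytics"]]
    else if PySem.Str.isIn "mcp server" text || PySem.Str.isIn "mcp" text then
      [["gidrs", "mcp-server"]]
    else if PySem.Str.isIn "language selection" text || PySem.Str.isIn "language" text then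
      [["gidrs", "language-selection"]]
    else if PySem.Str.isIn "create gidr" text && PySem.Str.isIn "team" text then
      [["gidrs", "create-gidr"]]
    else if PySem.Str.isIn "gidr info" text || PySem.Str.isIn "info popup" text then
      [["gidr", "info", "gidr-info"]]
    else if PySem.Str.isIn "prompt" text then
      [["gidr", "prompts"]]
    else if PySem.Str.isIn "data source" text || PySem.Str.isIn "data sources" text then
      [["gidr", "ingestion-settings", "data-sources"]]
    else if PySem.Str.isIn "file" text && (PySem.Str.isIn "upload" text || PySem.Str.isIn "ingest" text) then
      [["gidr", "ingestion-settings", "data-sources", "files"]]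
    else if PySem.Str.isIn "url" text && (PySem.Str.isIn "add" text || PySem.Str.isIn "ingest" text) then
      [["gidr", "ingestion-settings", "data-sources", "urls"]]
    else if PySem.Str.isIn "connector" text then
      [["gidr", "ingestion-settings", "data-sources", "connectors"]]
    else if PySem.Str.isIn "database" text then
      [["gidr", "ingestion-settings", "data-sources", "database"]]
    else if PySem.Str.isIn "tag" text then
      [["gidr", "ingestion-settings", "tags"]]
    else if PySem.Str.isIn "gidget" text || PySem.Str.isIn "gidgets library" text then
      [["gidr", "design", "gidgets-library"]]
    else if PySem.Str.isIn "studio" text then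
      [["gidr", "design", "studio"]]
    else if PySem.Str.isIn "workflow" text || PySem.Str.isIn "work flow" text then
      [["gidr", "workflows"]]
    else if PySem.Str.isIn "node" text && (PySem.Str.isIn "workflow" text || PySem.Str.isIn "flow" text) then
      [["gidr", "workflows", "nodes"]]
    else
      []
  let categories := if categories = [] then [["uncategorized"]] else categories
  if categories = [] then ["uncategorized"] else (PySem.List.pyGet? categories 0).getD ["uncategorized"]

-- ===== PORT B =====
-- Source B's KEYWORDS list
def pvKeywords : List String :=
  [ "sign in", "signin", "login", "log in", "sign-in",
    "invalid", "error",
    "sign up", "signup", "register", "registration", "sign-up",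
    "landing page", "landing",
    "forgot password", "reset password", "change password",
    "create team", "create a team", "team creation",
    "member profile", "profile",
    "organization settings", "org settings",
    "invite member", "invite",
    "analytics",
    "mcp server", "mcp",
    "language selection", "language",
    "create gidr", "team",
    "gidr info", "info popup",
    "prompt",
    "data source", "data sources",
    "file", "upload", "ingest",
    "url", "add",
    "connector", "database", "tag",
    "gidget", "gidgets library",
    "studio",
    "workflow", "work flow",
    "node", "flow" ]

-- Source B's _found_keywords: one sweep over the text, recording every keyword starting at each position
def pvFound (text : String) : PySem.Set String :=
  (PySem.List.pyRange 0 ((text.toList.length : Int) + 1) 1).foldl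
    (fun found i =>
      pvKeywords.foldl
        (fun found kw =>
          if PySem.List.slice text.toList (some i) (some (i + (kw.toList.length : Int))) = kw.toList
          then PySem.Set.add found kw else found)
        found)
    PySem.Set.empty

def categorize_testcase_alt (tc : List (String × Option String)) : List String :=
  let d := PySem.Dict.mk tc
  let name := PySem.Str.lower (((d.get? "name").getD none).getD "")
  let objective := PySem.Str.lower (((d.get? "objective").getD none).getD "")
  let text := PySem.Str.lower (PySem.Str.join "" [name, " ", objective])
  let found := pvFound text
  let err := !(PySem.Set.inter found ["invalid", "error"]).isEmpty
  if !(PySem.Set.inter found ["sign in", "signin", "login", "log in", "sign-in"]).isEmpty then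
    if err then ["authentication", "signing-in", "error-cases"] else ["authentication", "signing-in"]
  else if !(PySem.Set.inter found ["sign up", "signup", "register", "registration", "sign-up"]).isEmpty then
    if err then ["authentication", "signing-up", "error-cases"] else ["authentication", "signing-up"]
  else if !(PySem.Set.inter found ["landing page", "landing"]).isEmpty then
    ["authentication", "landing-page"]
  else if !(PySem.Set.inter found ["forgot password", "reset password", "change password"]).isEmpty then
    ["authentication", "signing-in", "password-management"]
  else if !(PySem.Set.inter found ["create team", "create a team", "team creation"]).isEmpty then
    ["organizations", "create-team"]
  else if !(PySem.Set.inter found ["member profile", "profile"]).isEmpty then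
    ["organizations", "member-profile"]
  else if !(PySem.Set.inter found ["organization settings", "org settings"]).isEmpty then
    ["organizations", "organization-settings"]
  else if !(PySem.Set.inter found ["invite member", "invite"]).isEmpty then
    ["organizations", "invite-members"]
  else if PySem.Set.contains found "analytics" then
    ["gidrs", "analytics"]
  else if !(PySem.Set.inter found ["mcp server", "mcp"]).isEmpty then
    ["gidrs", "mcp-server"]
  else if !(PySem.Set.inter found ["language selection", "language"]).isEmpty then
    ["gidrs", "language-selection"]
  else if PySem.Set.issubset ["create gidr", "team"] found then
    ["gidrs", "create-gidr"]
  else if !(PySem.Set.inter found ["gidr info", "info popup"]).isEmpty then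
    ["gidr", "info", "gidr-info"]
  else if PySem.Set.contains found "prompt" then
    ["gidr", "prompts"]
  else if !(PySem.Set.inter found ["data source", "data sources"]).isEmpty then
    ["gidr", "ingestion-settings", "data-sources"]
  else if PySem.Set.contains found "file" && !(PySem.Set.inter found ["upload", "ingest"]).isEmpty then
    ["gidr", "ingestion-settings", "data-sources", "files"]
  else if PySem.Set.contains found "url" && !(PySem.Set.inter found ["add", "ingest"]).isEmpty then
    ["gidr", "ingestion-settings", "data-sources", "urls"]
  else if PySem.Set.contains found "connector" then
    ["gidr", "ingestion-settings", "data-sources", "connectors"]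
  else if PySem.Set.contains found "database" then
    ["gidr", "ingestion-settings", "data-sources", "database"]
  else if PySem.Set.contains found "tag" then
    ["gidr", "ingestion-settings", "tags"]
  else if !(PySem.Set.inter found ["gidget", "gidgets library"]).isEmpty then
    ["gidr", "design", "gidgets-library"]
  else if PySem.Set.contains found "studio" then
    ["gidr", "design", "studio"]
  else if !(PySem.Set.inter found ["workflow", "work flow"]).isEmpty then
    ["gidr", "workflows"]
  else if PySem.Set.contains found "node" && !(PySem.Set.inter found ["workflow", "flow"]).isEmpty then
    ["gidr", "workflows", "nodes"]
  else
    ["uncategorized"]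

-- ===== PRECONDITION & SPEC =====
def Spec_categorize_testcase (tc : List (String × Option String)) (out : List String) : Prop := out = categorize_testcase_alt tc
instance (tc : List (String × Option String)) (out : List String) : Decidable (Spec_categorize_testcase tc out) := by unfold Spec_categorize_testcase; infer_instance

-- ===== CLAIM =====
def Claim_equal_categorize_testcase : Prop := ∀ (tc : List (String × Option String)), Dom_categorize_testcase tc → Spec_categorize_testcase tc (categorize_testcase tc)

-- ===== LEMMAS AND PROOFS =====

-- membership in the inner keyword fold: x got added iff x is a keyword matching at this position
theorem pv_mem_inner_fold (l : List String) (p : String → Prop) [DecidablePred p]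
    (s : PySem.Set String) (x : String) :
    x ∈ l.foldl (fun acc kw => if p kw then PySem.Set.add acc kw else acc) s ↔
      x ∈ s ∨ (x ∈ l ∧ p x) := by
  induction l generalizing s with
  | nil => simp
  | cons a l ih =>
    rw [List.foldl_cons, ih]
    by_cases hp : p a
    · rw [if_pos hp]
      by_cases hxa : x = a
      · subst hxa; simp [hp, PySem.Set.mem_add]
      · simp only [PySem.Set.mem_add, List.mem_cons]; tauto
    · rw [if_neg hp]
      by_cases hxa : x = a
      · subst hxa; simp [hp]
      · simp only [List.mem_cons]; tauto

-- membership in the outer position fold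
theorem pv_mem_outer_fold (lr : List Int) (q : Int → String → Prop)
    [inst : ∀ i kw, Decidable (q i kw)] (s : PySem.Set String) (x : String) :
    x ∈ lr.foldl (fun acc i =>
        pvKeywords.foldl (fun acc kw => if q i kw then PySem.Set.add acc kw else acc) acc) s ↔
      x ∈ s ∨ ∃ i ∈ lr, x ∈ pvKeywords ∧ q i x := by
  induction lr generalizing s with
  | nil => simp
  | cons a lr ih =>
    simp only [List.foldl_cons, ih, pv_mem_inner_fold, List.mem_cons]
    constructor
    · rintro ((h | ⟨h1, h2⟩) | ⟨i, hi, h⟩)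
      · exact Or.inl h
      · exact Or.inr ⟨a, Or.inl rfl, h1, h2⟩
      · exact Or.inr ⟨i, Or.inr hi, h⟩
    · rintro (h | ⟨i, (rfl | hi), h⟩)
      · exact Or.inl (Or.inl h)
      · exact Or.inl (Or.inr h)
      · exact Or.inr ⟨i, hi, h⟩

-- every keyword is a nonempty string
theorem pv_keywords_ne_nil : ∀ w ∈ pvKeywords, w.toList ≠ [] := by decide

-- the sweep collects exactly the keywords occurring as substrings of the text
theorem pv_mem_found (t : String) (kw : String) :
    kw ∈ pvFound t ↔ kw ∈ pvKeywords ∧ PySem.Str.isIn kw t = true := by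
  unfold pvFound
  rw [pv_mem_outer_fold]
  simp only [PySem.Set.empty, List.not_mem_nil, false_or]
  constructor
  · rintro ⟨i, hi, hkw, hq⟩
    refine ⟨hkw, ?_⟩
    rw [PySem.List.mem_pyRange_one] at hi
    obtain ⟨j, rfl⟩ := Int.eq_ofNat_of_zero_le hi.1
    rw [PySem.List.slice_natCast_add] at hq
    have hpre : kw.toList <+: t.toList.drop j := List.prefix_iff_eq_take.mpr hq.symm
    have h2 := (PySem.Chars.exists_prefix_drop_iff_isIn kw.toList t.toList).mp ⟨j, hpre⟩
    simpa [PySem.Str.isIn_eq] using h2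
  · rintro ⟨hkw, hin⟩
    have h2 : PySem.Chars.isIn kw.toList t.toList = true := by
      simpa [PySem.Str.isIn_eq] using hin
    obtain ⟨j, hpre⟩ := (PySem.Chars.exists_prefix_drop_iff_isIn kw.toList t.toList).mpr h2
    by_cases hj : j ≤ t.toList.length
    · refine ⟨(j : Int), ?_, hkw, ?_⟩
      · rw [PySem.List.mem_pyRange_one]
        constructor
        · exact Int.natCast_nonneg j
        · omega
      · rw [PySem.List.slice_natCast_add]
        exact (List.prefix_iff_eq_take.mp hpre).symm
    · exfalso
      have hnil : t.toList.drop j = [] := List.drop_eq_nil_of_le (by omega)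
      rw [hnil] at hpre
      exact pv_keywords_ne_nil kw hkw (List.prefix_nil.mp hpre)

-- B's set-intersection test equals A's any-substring test, for keyword groups
theorem pv_inter_found (t : String) (S : List String) (hS : ∀ w ∈ S, w ∈ pvKeywords) :
    (!(PySem.Set.inter (pvFound t) S).isEmpty) = S.any (fun w => PySem.Str.isIn w t) := by
  rw [Bool.eq_iff_iff]
  simp only [Bool.not_eq_true']
  rw [show ((PySem.Set.inter (pvFound t) S).isEmpty = false ↔
        ∃ x, x ∈ PySem.Set.inter (pvFound t) S) from by simp [List.eq_nil_iff_forall_not_mem]]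
  simp only [PySem.Set.mem_inter, pv_mem_found, List.any_eq_true]
  constructor
  · rintro ⟨x, ⟨_, hi⟩, hxS⟩; exact ⟨x, hxS, hi⟩
  · rintro ⟨w, hwS, hw⟩; exact ⟨w, ⟨hS w hwS, hw⟩, hwS⟩

-- B's set-membership test equals A's substring test, for single keywords
theorem pv_contains_found (t : String) (kw : String) (h : kw ∈ pvKeywords) :
    PySem.Set.contains (pvFound t) kw = PySem.Str.isIn kw t := by
  rw [Bool.eq_iff_iff, PySem.Set.contains_iff, pv_mem_found]
  exact ⟨fun ⟨_, hi⟩ => hi, fun hi => ⟨h, hi⟩⟩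

-- B's subset test equals A's conjunction of substring tests
theorem pv_subset_found (t : String) (S : List String) (hS : ∀ w ∈ S, w ∈ pvKeywords) :
    PySem.Set.issubset S (pvFound t) = S.all (fun w => PySem.Str.isIn w t) := by
  rw [Bool.eq_iff_iff, PySem.Set.issubset_iff]
  simp only [pv_mem_found, List.all_eq_true]
  exact ⟨fun h w hw => (h w hw).2, fun h w hw => ⟨hS w hw, h w hw⟩⟩

-- ===== VERDICT (by name: the statement is the Claim_ definition above) =====
set_option maxHeartbeats 2000000 in
theorem categorize_testcase_spec : Claim_equal_categorize_testcase := by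
  intro tc _
  unfold Spec_categorize_testcase categorize_testcase categorize_testcase_alt
  simp only []
  generalize PySem.Str.lower (PySem.Str.join "" [PySem.Str.lower _, " ", PySem.Str.lower _]) = t
  simp only [
    pv_inter_found t ["invalid", "error"] (by decide),
    pv_inter_found t ["sign in", "signin", "login", "log in", "sign-in"] (by decide),
    pv_inter_found t ["sign up", "signup", "register", "registration", "sign-up"] (by decide),
    pv_inter_found t ["landing page", "landing"] (by decide),
    pv_inter_found t ["forgot password", "reset password", "change password"] (by decide),
    pv_inter_found t ["create team", "create a team", "team creation"] (by decide),
    pv_inter_found t ["member profile", "profile"] (by decide),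
    pv_inter_found t ["organization settings", "org settings"] (by decide),
    pv_inter_found t ["invite member", "invite"] (by decide),
    pv_inter_found t ["mcp server", "mcp"] (by decide),
    pv_inter_found t ["language selection", "language"] (by decide),
    pv_inter_found t ["gidr info", "info popup"] (by decide),
    pv_inter_found t ["data source", "data sources"] (by decide),
    pv_inter_found t ["upload", "ingest"] (by decide),
    pv_inter_found t ["add", "ingest"] (by decide),
    pv_inter_found t ["gidget", "gidgets library"] (by decide),
    pv_inter_found t ["workflow", "work flow"] (by decide),
    pv_inter_found t ["workflow", "flow"] (by decide),
    pv_contains_found t "analytics" (by decide),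
    pv_contains_found t "prompt" (by decide),
    pv_contains_found t "file" (by decide),
    pv_contains_found t "url" (by decide),
    pv_contains_found t "connector" (by decide),
    pv_contains_found t "database" (by decide),
    pv_contains_found t "tag" (by decide),
    pv_contains_found t "studio" (by decide),
    pv_contains_found t "node" (by decide),
    pv_subset_found t ["create gidr", "team"] (by decide),
    List.any_cons, List.any_nil, List.all_cons, List.all_nil, Bool.or_false, Bool.and_true]
  rcases Bool.eq_false_or_eq_true ((PySem.Str.isIn "sign in" t || (PySem.Str.isIn "signin" t || (PySem.Str.isIn "login" t || (PySem.Str.isIn "log in" t || PySem.Str.isIn "sign-in" t))))) with h0 | h0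
  · rcases Bool.eq_false_or_eq_true ((PySem.Str.isIn "invalid" t || PySem.Str.isIn "error" t)) with he | he
    · simp only [h0, he, Bool.false_eq_true, if_true, if_false] <;> rfl
    · simp only [h0, he, Bool.false_eq_true, if_true, if_false] <;> rfl
  · -- h0 = false: next condition
    rcases Bool.eq_false_or_eq_true ((PySem.Str.isIn "sign up" t || (PySem.Str.isIn "signup" t || (PySem.Str.isIn "register" t || (PySem.Str.isIn "registration" t || PySem.Str.isIn "sign-up" t))))) with h1 | h1
    · rcases Bool.eq_false_or_eq_true ((PySem.Str.isIn "invalid" t || PySem.Str.isIn "error" t)) with he | he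
      · simp only [h0, h1, he, Bool.false_eq_true, if_true, if_false] <;> rfl
      · simp only [h0, h1, he, Bool.false_eq_true, if_true, if_false] <;> rfl
    · -- h1 = false: next condition
      rcases Bool.eq_false_or_eq_true ((PySem.Str.isIn "landing page" t || PySem.Str.isIn "landing" t)) with h2 | h2
      · simp only [h0, h1, h2, Bool.false_eq_true, if_true, if_false] <;> rfl
      · -- h2 = false: next condition
        rcases Bool.eq_false_or_eq_true ((PySem.Str.isIn "forgot password" t || (PySem.Str.isIn "reset password" t || PySem.Str.isIn "change password" t))) with h3 | h3
        · simp only [h0, h1, h2, h3, Bool.false_eq_true, if_true, if_false] <;> rfl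
        · -- h3 = false: next condition
          rcases Bool.eq_false_or_eq_true ((PySem.Str.isIn "create team" t || (PySem.Str.isIn "create a team" t || PySem.Str.isIn "team creation" t))) with h4 | h4
          · simp only [h0, h1, h2, h3, h4, Bool.false_eq_true, if_true, if_false] <;> rfl
          · -- h4 = false: next condition
            rcases Bool.eq_false_or_eq_true ((PySem.Str.isIn "member profile" t || PySem.Str.isIn "profile" t)) with h5 | h5
            · simp only [h0, h1, h2, h3, h4, h5, Bool.false_eq_true, if_true, if_false] <;> rfl
            · -- h5 = false: next condition
              rcases Bool.eq_false_or_eq_true ((PySem.Str.isIn "organization settings" t || PySem.Str.isIn "org settings" t)) with h6 | h6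
              · simp only [h0, h1, h2, h3, h4, h5, h6, Bool.false_eq_true, if_true, if_false] <;> rfl
              · -- h6 = false: next condition
                rcases Bool.eq_false_or_eq_true ((PySem.Str.isIn "invite member" t || PySem.Str.isIn "invite" t)) with h7 | h7
                · simp only [h0, h1, h2, h3, h4, h5, h6, h7, Bool.false_eq_true, if_true, if_false] <;> rfl
                · -- h7 = false: next condition
                  rcases Bool.eq_false_or_eq_true (PySem.Str.isIn "analytics" t) with h8 | h8
                  · simp only [h0, h1, h2, h3, h4, h5, h6, h7, h8, Bool.false_eq_true, if_true, if_false] <;> rfl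
                  · -- h8 = false: next condition
                    rcases Bool.eq_false_or_eq_true ((PySem.Str.isIn "mcp server" t || PySem.Str.isIn "mcp" t)) with h9 | h9
                    · simp only [h0, h1, h2, h3, h4, h5, h6, h7, h8, h9, Bool.false_eq_true, if_true, if_false] <;> rfl
                    · -- h9 = false: next condition
                      rcases Bool.eq_false_or_eq_true ((PySem.Str.isIn "language selection" t || PySem.Str.isIn "language" t)) with h10 | h10
                      · simp only [h0, h1, h2, h3, h4, h5, h6, h7, h8, h9, h10, Bool.false_eq_true, if_true, if_false] <;> rfl
                      · -- h10 = false: next condition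
                        rcases Bool.eq_false_or_eq_true ((PySem.Str.isIn "create gidr" t && PySem.Str.isIn "team" t)) with h11 | h11
                        · simp only [h0, h1, h2, h3, h4, h5, h6, h7, h8, h9, h10, h11, Bool.false_eq_true, if_true, if_false] <;> rfl
                        · -- h11 = false: next condition
                          rcases Bool.eq_false_or_eq_true ((PySem.Str.isIn "gidr info" t || PySem.Str.isIn "info popup" t)) with h12 | h12
                          · simp only [h0, h1, h2, h3, h4, h5, h6, h7, h8, h9, h10, h11, h12, Bool.false_eq_true, if_true, if_false] <;> rfl
                          · -- h12 = false: next condition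
                            rcases Bool.eq_false_or_eq_true (PySem.Str.isIn "prompt" t) with h13 | h13
                            · simp only [h0, h1, h2, h3, h4, h5, h6, h7, h8, h9, h10, h11, h12, h13, Bool.false_eq_true, if_true, if_false] <;> rfl
                            · -- h13 = false: next condition
                              rcases Bool.eq_false_or_eq_true ((PySem.Str.isIn "data source" t || PySem.Str.isIn "data sources" t)) with h14 | h14
                              · simp only [h0, h1, h2, h3, h4, h5, h6, h7, h8, h9, h10, h11, h12, h13, h14, Bool.false_eq_true, if_true, if_false] <;> rfl
                              · -- h14 = false: next condition
                                rcases Bool.eq_false_or_eq_true ((PySem.Str.isIn "file" t && (PySem.Str.isIn "upload" t || PySem.Str.isIn "ingest" t))) with h15 | h15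
                                · simp only [h0, h1, h2, h3, h4, h5, h6, h7, h8, h9, h10, h11, h12, h13, h14, h15, Bool.false_eq_true, if_true, if_false] <;> rfl
                                · -- h15 = false: next condition
                                  rcases Bool.eq_false_or_eq_true ((PySem.Str.isIn "url" t && (PySem.Str.isIn "add" t || PySem.Str.isIn "ingest" t))) with h16 | h16
                                  · simp only [h0, h1, h2, h3, h4, h5, h6, h7, h8, h9, h10, h11, h12, h13, h14, h15, h16, Bool.false_eq_true, if_true, if_false] <;> rfl
                                  · -- h16 = false: next condition
                                    rcases Bool.eq_false_or_eq_true (PySem.Str.isIn "connector" t) with h17 | h17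
                                    · simp only [h0, h1, h2, h3, h4, h5, h6, h7, h8, h9, h10, h11, h12, h13, h14, h15, h16, h17, Bool.false_eq_true, if_true, if_false] <;> rfl
                                    · -- h17 = false: next condition
                                      rcases Bool.eq_false_or_eq_true (PySem.Str.isIn "database" t) with h18 | h18
                                      · simp only [h0, h1, h2, h3, h4, h5, h6, h7, h8, h9, h10, h11, h12, h13, h14, h15, h16, h17, h18, Bool.false_eq_true, if_true, if_false] <;> rfl
                                      · -- h18 = false: next condition
                                        rcases Bool.eq_false_or_eq_true (PySem.Str.isIn "tag" t) with h19 | h19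
                                        · simp only [h0, h1, h2, h3, h4, h5, h6, h7, h8, h9, h10, h11, h12, h13, h14, h15, h16, h17, h18, h19, Bool.false_eq_true, if_true, if_false] <;> rfl
                                        · -- h19 = false: next condition
                                          rcases Bool.eq_false_or_eq_true ((PySem.Str.isIn "gidget" t || PySem.Str.isIn "gidgets library" t)) with h20 | h20
                                          · simp only [h0, h1, h2, h3, h4, h5, h6, h7, h8, h9, h10, h11, h12, h13, h14, h15, h16, h17, h18, h19, h20, Bool.false_eq_true, if_true, if_false] <;> rfl
                                          · -- h20 = false: next condition
                                            rcases Bool.eq_false_or_eq_true (PySem.Str.isIn "studio" t) with h21 | h21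
                                            · simp only [h0, h1, h2, h3, h4, h5, h6, h7, h8, h9, h10, h11, h12, h13, h14, h15, h16, h17, h18, h19, h20, h21, Bool.false_eq_true, if_true, if_false] <;> rfl
                                            · -- h21 = false: next condition
                                              rcases Bool.eq_false_or_eq_true ((PySem.Str.isIn "workflow" t || PySem.Str.isIn "work flow" t)) with h22 | h22
                                              · simp only [h0, h1, h2, h3, h4, h5, h6, h7, h8, h9, h10, h11, h12, h13, h14, h15, h16, h17, h18, h19, h20, h21, h22, Bool.false_eq_true, if_true, if_false] <;> rfl
                                              · -- h22 = false: next condition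
                                                rcases Bool.eq_false_or_eq_true ((PySem.Str.isIn "node" t && (PySem.Str.isIn "workflow" t || PySem.Str.isIn "flow" t))) with h23 | h23
                                                · simp only [h0, h1, h2, h3, h4, h5, h6, h7, h8, h9, h10, h11, h12, h13, h14, h15, h16, h17, h18, h19, h20, h21, h22, h23, Bool.false_eq_true, if_true, if_false] <;> rfl
                                                · simp only [h0, h1, h2, h3, h4, h5, h6, h7, h8, h9, h10, h11, h12, h13, h14, h15, h16, h17, h18, h19, h20, h21, h22, h23, Bool.false_eq_true, if_true, if_false] <;> rfl
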